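-- pv_equiv track=rewrite | github.com/thiagosm/pyboleto | pyboleto/bank/banestes.py | _dv_campo_livre
-- ===== SOURCE A (Python) =====
-- def _dv_campo_livre(campo_livre):
--     dv1 = 0
--     dv2 = 0
--
--     # dv1
--     _c = '21212121212121212121212'
--     _t = tuple(campo_livre)
--     _z = 0
--
--     for i in range(len(_t)):
--         p = int(_t[i]) * int(_c[i])
--
--         if p > 9:
--             _z += (p - 9)
--         else:
--             _z += p
--
--     resto = _z % 10
--
--     if resto == 0:
--         dv1 = 0
--     else:
--         dv1 = 10 - resto
--
--     # dv2
--     def calc_dv2(campo_livre, dv1):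
--         _c = '765432765432765432765432'
--         _t = tuple('%s%s' % (campo_livre, dv1))
--         _z = 0
--
--         for i in range(len(_t)):
--             _z += int(_t[i]) * int(_c[i])
--
--         resto = _z % 11
--
--         if resto == 0:
--             return dv1, resto
--         elif resto == 1:
--             if dv1 < 9:
--                 return calc_dv2(campo_livre, dv1 + 1)
--             else:
--                 return calc_dv2(campo_livre, 0)
--         else:
--             return dv1, 11 - resto
--
--     dv1, dv2 = calc_dv2(campo_livre, dv1)
--
--     return "%s%s" % (dv1, dv2)
-- ===== SOURCE B (Python) =====
-- def _dv_campo_livre(campo_livre):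
--     # One pass over the digits computes both the alternating mod-10 sum (dv1)
--     # and the base weighted mod-11 sum; dv2 candidates are then tried
--     # arithmetically (z2 + w*d) without rebuilding the string.
--     w2pat = (7, 6, 5, 4, 3, 2)
--     z1 = 0
--     z2 = 0
--     w1 = 2
--     for i, ch in enumerate(campo_livre):
--         d = int(ch)
--         p = d * w1
--         z1 += p - 9 if p > 9 else p
--         w1 = 3 - w1
--         z2 += d * w2pat[i % 6]
--     dv1 = (10 - z1 % 10) % 10
--     w = w2pat[len(campo_livre) % 6]
--     d = dv1
--     while True:
--         resto = (z2 + w * d) % 11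
--         if resto == 0:
--             return "%s%s" % (d, 0)
--         if resto != 1:
--             return "%s%s" % (d, 11 - resto)
--         d = d + 1 if d < 9 else 0
-- ===== Notes on version B (the rewrite author's own statement) =====
-- stated objective: alternative
-- what changed: B fuses the dv1 and dv2 weighted sums into a single pass over the digit characters and then tries dv2 candidates arithmetically as (z2 + w*d) % 11, replacing A's recursive calc_dv2 that rebuilds and re-scans the whole string for every candidate.
import Mathlib
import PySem

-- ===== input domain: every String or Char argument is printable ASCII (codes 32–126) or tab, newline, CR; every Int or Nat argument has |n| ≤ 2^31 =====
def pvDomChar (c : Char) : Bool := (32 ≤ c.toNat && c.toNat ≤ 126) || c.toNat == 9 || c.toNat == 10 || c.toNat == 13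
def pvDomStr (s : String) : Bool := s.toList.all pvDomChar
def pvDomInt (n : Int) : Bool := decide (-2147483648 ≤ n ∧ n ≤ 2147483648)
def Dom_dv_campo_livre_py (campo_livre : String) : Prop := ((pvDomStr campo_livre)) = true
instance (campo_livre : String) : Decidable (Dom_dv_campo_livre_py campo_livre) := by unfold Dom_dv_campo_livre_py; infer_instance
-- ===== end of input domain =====

-- B fuses the two weighted sums into one pass over the digits and tries the dv2
-- candidates arithmetically ((z2 + w*d) % 11) instead of rebuilding and
-- re-scanning the string per candidate (objective: alternative decomposition).

-- ===== PORT A =====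
-- int(ch) for a single char: exact on digit chars '0'-'9' (Pre_ restricts to those)
def pvDig (c : Char) : Int := (c.toNat : Int) - 48

def pvC1A : List Char := "21212121212121212121212".toList
def pvC2A : List Char := "765432765432765432765432".toList

-- for i in range(len(_t)): the dv1 accumulation (getD is exact: Pre_ keeps indices in range)
def pvZ1A (t : List Char) : Int :=
  (List.range t.length).foldl (fun z i =>
    if pvDig (t.getD i ' ') * pvDig (pvC1A.getD i ' ') > 9
    then z + (pvDig (t.getD i ' ') * pvDig (pvC1A.getD i ' ') - 9)
    else z + pvDig (t.getD i ' ') * pvDig (pvC1A.getD i ' ')) 0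

-- for i in range(len(_t)): the dv2 accumulation
def pvZ2A (t : List Char) : Int :=
  (List.range t.length).foldl (fun z i =>
    z + pvDig (t.getD i ' ') * pvDig (pvC2A.getD i ' ')) 0

-- recursive calc_dv2; fuel is a totality guard only (Python recurses at most twice)
def pvCalcDv2A (campo : List Char) : Int → Nat → Int × Int
  | dv1, 0 => (dv1, 0)
  | dv1, fuel+1 =>
    let t := campo ++ PySem.Int.toChars dv1
    let resto := PySem.Int.mod (pvZ2A t) 11
    if resto = 0 then (dv1, resto)
    else if resto = 1 then
      if dv1 < 9 then pvCalcDv2A campo (dv1 + 1) fuel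
      else pvCalcDv2A campo 0 fuel
    else (dv1, 11 - resto)

def dv_campo_livre_py (campo_livre : String) : String :=
  let t := campo_livre.toList
  let resto := PySem.Int.mod (pvZ1A t) 10
  let dv1 : Int := if resto = 0 then 0 else 10 - resto
  let r := pvCalcDv2A t dv1 11
  String.ofList (PySem.Int.toChars r.1 ++ PySem.Int.toChars r.2)

-- ===== PORT B =====
def pvW2 : List Int := [7, 6, 5, 4, 3, 2]

-- the single fused pass: for i, ch in enumerate(campo_livre), state (z1, z2, w1)
def pvPassB : List (Int × Char) → Int × Int × Int → Int × Int × Int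
  | [], st => st
  | (i, ch) :: rest, (z1, z2, w1) =>
    let d := pvDig ch
    let p := d * w1
    pvPassB rest (z1 + (if p > 9 then p - 9 else p),
                  z2 + d * pvW2.getD (PySem.Int.mod i 6).toNat 0,
                  3 - w1)

-- the while True candidate loop; fuel is a totality guard only
def pvLoopB (z2 w : Int) : Int → Nat → String
  | d, 0 => String.ofList (PySem.Int.toChars d ++ PySem.Int.toChars 0)
  | d, fuel+1 =>
    let resto := PySem.Int.mod (z2 + w * d) 11
    if resto = 0 then String.ofList (PySem.Int.toChars d ++ PySem.Int.toChars 0)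
    else if resto ≠ 1 then String.ofList (PySem.Int.toChars d ++ PySem.Int.toChars (11 - resto))
    else pvLoopB z2 w (if d < 9 then d + 1 else 0) fuel

def dv_campo_livre_py_alt (campo_livre : String) : String :=
  let st := pvPassB (PySem.List.enumerate campo_livre.toList) (0, 0, 2)
  let dv1 := PySem.Int.mod (10 - PySem.Int.mod st.1 10) 10
  let w := pvW2.getD (PySem.Int.mod ((campo_livre.toList.length : Int)) 6).toNat 0
  pvLoopB st.2.1 w dv1 11

-- ===== PRECONDITION & SPEC =====
-- Pre_ excludes inputs on which Python A raises: a non-digit char makes int(ch)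
-- raise ValueError, and a string longer than 23 makes _c[i] raise IndexError.
def Pre_dv_campo_livre_py (campo_livre : String) : Prop :=
  (campo_livre.toList.all (fun c => 48 ≤ c.toNat && c.toNat ≤ 57)) = true ∧ campo_livre.toList.length ≤ 23
instance (campo_livre : String) : Decidable (Pre_dv_campo_livre_py campo_livre) := by
  unfold Pre_dv_campo_livre_py; infer_instance
def pvWitness_dv_campo_livre_py : String := "73"

def Spec_dv_campo_livre_py (campo_livre : String) (out : String) : Prop := out = dv_campo_livre_py_alt campo_livre
instance (campo_livre : String) (out : String) : Decidable (Spec_dv_campo_livre_py campo_livre out) := by unfold Spec_dv_campo_livre_py; infer_instance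

-- ===== CLAIM (what is proved, stated in full; the proofs are below) =====
def Claim_equal_dv_campo_livre_py : Prop := ∀ (campo_livre : String), Dom_dv_campo_livre_py campo_livre → Pre_dv_campo_livre_py campo_livre → Spec_dv_campo_livre_py campo_livre (dv_campo_livre_py campo_livre)

-- ===== LEMMAS AND PROOFS =====

-- weight tables agree: '2121…' indexed in range equals the alternating 2/1 state
theorem pvC1A_val : ∀ n < 23, pvDig (pvC1A.getD n ' ') = (if n % 2 = 0 then 2 else 1) := by decide

-- '765432…' indexed in range equals the 6-periodic table lookup
theorem pvC2A_val : ∀ n < 24,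
    pvDig (pvC2A.getD n ' ') = pvW2.getD (PySem.Int.mod (n : Int) 6).toNat 0 := by decide

theorem pvZ1A_append (t : List Char) (c : Char) :
    pvZ1A (t ++ [c]) =
      (if pvDig c * pvDig (pvC1A.getD t.length ' ') > 9
       then pvZ1A t + (pvDig c * pvDig (pvC1A.getD t.length ' ') - 9)
       else pvZ1A t + pvDig c * pvDig (pvC1A.getD t.length ' ')) := by
  have hmid := PySem.List.foldl_congr_mem (List.range t.length)
    (fun z i => if pvDig ((t ++ [c]).getD i ' ') * pvDig (pvC1A.getD i ' ') > 9
                then z + (pvDig ((t ++ [c]).getD i ' ') * pvDig (pvC1A.getD i ' ') - 9)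
                else z + pvDig ((t ++ [c]).getD i ' ') * pvDig (pvC1A.getD i ' '))
    (fun z i => if pvDig (t.getD i ' ') * pvDig (pvC1A.getD i ' ') > 9
                then z + (pvDig (t.getD i ' ') * pvDig (pvC1A.getD i ' ') - 9)
                else z + pvDig (t.getD i ' ') * pvDig (pvC1A.getD i ' ')) 0
    (by intro acc i hi
        have hlt : i < t.length := List.mem_range.mp hi
        simp only [List.getD_append t [c] ' ' i hlt])
  unfold pvZ1A
  rw [List.length_append, List.length_cons, List.length_nil, List.range_succ, List.foldl_append,
      hmid]
  have hc : (t ++ [c]).getD t.length ' ' = c := by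
    rw [List.getD_append_right t [c] ' ' t.length le_rfl]
    simp
  simp only [List.foldl_cons, List.foldl_nil, hc]

theorem pvZ2A_append (t : List Char) (c : Char) :
    pvZ2A (t ++ [c]) = pvZ2A t + pvDig c * pvDig (pvC2A.getD t.length ' ') := by
  have hmid := PySem.List.foldl_congr_mem (List.range t.length)
    (fun z i => z + pvDig ((t ++ [c]).getD i ' ') * pvDig (pvC2A.getD i ' '))
    (fun z i => z + pvDig (t.getD i ' ') * pvDig (pvC2A.getD i ' ')) 0
    (by intro acc i hi
        have hlt : i < t.length := List.mem_range.mp hi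
        simp only [List.getD_append t [c] ' ' i hlt])
  unfold pvZ2A
  rw [List.length_append, List.length_cons, List.length_nil, List.range_succ, List.foldl_append,
      hmid]
  have hc : (t ++ [c]).getD t.length ' ' = c := by
    rw [List.getD_append_right t [c] ' ' t.length le_rfl]
    simp
  simp only [List.foldl_cons, List.foldl_nil, hc]

theorem toChars_digit (d : Int) (h0 : 0 ≤ d) (h9 : d ≤ 9) :
    ∃ c, PySem.Int.toChars d = [c] ∧ pvDig c = d := by
  interval_cases d
  · exact ⟨'0', by decide, by decide⟩
  · exact ⟨'1', by decide, by decide⟩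
  · exact ⟨'2', by decide, by decide⟩
  · exact ⟨'3', by decide, by decide⟩
  · exact ⟨'4', by decide, by decide⟩
  · exact ⟨'5', by decide, by decide⟩
  · exact ⟨'6', by decide, by decide⟩
  · exact ⟨'7', by decide, by decide⟩
  · exact ⟨'8', by decide, by decide⟩
  · exact ⟨'9', by decide, by decide⟩

theorem pvZ2A_append_digit (t : List Char) (d : Int) (h0 : 0 ≤ d) (h9 : d ≤ 9) :
    pvZ2A (t ++ PySem.Int.toChars d) = pvZ2A t + pvDig (pvC2A.getD t.length ' ') * d := by
  obtain ⟨c, hc, hd⟩ := toChars_digit d h0 h9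
  rw [hc, pvZ2A_append, hd]
  ring

theorem pvPassB_append (l1 l2 : List (Int × Char)) (st : Int × Int × Int) :
    pvPassB (l1 ++ l2) st = pvPassB l2 (pvPassB l1 st) := by
  induction l1 generalizing st with
  | nil => rfl
  | cons p rest ih =>
    obtain ⟨i, ch⟩ := p
    obtain ⟨z1, z2, w1⟩ := st
    simp only [List.cons_append, pvPassB]
    exact ih _

theorem passB_eq (t : List Char) (hlen : t.length ≤ 23) :
    pvPassB (PySem.List.enumerate t) (0, 0, 2) =
      (pvZ1A t, pvZ2A t, if t.length % 2 = 0 then 2 else 1) := by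
  induction t using List.reverseRecOn with
  | nil => decide
  | append_singleton xs c ih =>
    have hlt : xs.length < 23 := by
      have := hlen
      rw [List.length_append, List.length_cons, List.length_nil] at this
      omega
    rw [PySem.List.enumerate_append, pvPassB_append, ih (by omega)]
    have henum : PySem.List.enumerate [c] ((0 : Int) + xs.length) = [((xs.length : Int), c)] := by
      rw [PySem.List.enumerate_cons]
      simp [PySem.List.enumerate_nil]
    rw [henum]
    simp only [pvPassB]
    rw [pvZ1A_append, pvZ2A_append, pvC1A_val xs.length hlt, pvC2A_val xs.length (by omega)]
    simp only [Prod.mk.injEq]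
    refine ⟨?_, ?_, ?_⟩
    · split_ifs <;> ring
    · trivial
    · simp only [List.length_append, List.length_cons, List.length_nil]
      split_ifs <;> omega

theorem loop_eq (t : List Char) (hlen : t.length ≤ 23) :
    ∀ (fuel : Nat) (d : Int), 0 ≤ d → d ≤ 9 →
    String.ofList (PySem.Int.toChars (pvCalcDv2A t d fuel).1 ++
               PySem.Int.toChars (pvCalcDv2A t d fuel).2)
      = pvLoopB (pvZ2A t) (pvW2.getD (PySem.Int.mod ((t.length : Int)) 6).toNat 0) d fuel := by
  intro fuel
  induction fuel with
  | zero => intro d _ _; rfl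
  | succ n ih =>
    intro d h0 h9
    have hw : pvDig (pvC2A.getD t.length ' ') =
        pvW2.getD (PySem.Int.mod ((t.length : Int)) 6).toNat 0 :=
      pvC2A_val t.length (by omega)
    have hsum : pvZ2A (t ++ PySem.Int.toChars d) =
        pvZ2A t + pvW2.getD (PySem.Int.mod ((t.length : Int)) 6).toNat 0 * d := by
      rw [pvZ2A_append_digit t d h0 h9, hw]
    simp only [pvCalcDv2A, pvLoopB, hsum]
    by_cases hr0 : PySem.Int.mod (pvZ2A t + pvW2.getD (PySem.Int.mod ((t.length : Int)) 6).toNat 0 * d) 11 = 0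
    · rw [if_pos hr0, if_pos hr0, hr0]
    · rw [if_neg hr0, if_neg hr0]
      by_cases hr1 : PySem.Int.mod (pvZ2A t + pvW2.getD (PySem.Int.mod ((t.length : Int)) 6).toNat 0 * d) 11 = 1
      · rw [if_pos hr1, if_neg (show ¬PySem.Int.mod (pvZ2A t + pvW2.getD (PySem.Int.mod ((t.length : Int)) 6).toNat 0 * d) 11 ≠ 1 from fun h => h hr1)]
        by_cases hd9 : d < 9
        · rw [if_pos hd9, if_pos hd9]
          exact ih (d + 1) (by omega) (by omega)
        · rw [if_neg hd9, if_neg hd9]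
          exact ih 0 (by omega) (by omega)
      · rw [if_neg hr1, if_pos hr1]

theorem dv1_formula (z : Int) :
    (if PySem.Int.mod z 10 = 0 then (0 : Int) else 10 - PySem.Int.mod z 10) =
      PySem.Int.mod (10 - PySem.Int.mod z 10) 10 := by
  have h0 : 0 ≤ PySem.Int.mod z 10 := PySem.Int.mod_nonneg z (by norm_num)
  have h1 : PySem.Int.mod z 10 < 10 := PySem.Int.mod_lt z (by norm_num)
  set r := PySem.Int.mod z 10 with hr
  have he : PySem.Int.mod (10 - r) 10 = (10 - r) % 10 :=
    PySem.Int.mod_eq_emod_of_pos (by norm_num)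
  rw [he]
  split_ifs with h <;> omega

-- ===== VERDICT (by name: the statement is the Claim_ definition above) =====
theorem dv_campo_livre_py_spec : Claim_equal_dv_campo_livre_py := by
  intro s _ hpre
  obtain ⟨_, hlen⟩ := hpre
  unfold Spec_dv_campo_livre_py dv_campo_livre_py dv_campo_livre_py_alt
  rw [passB_eq s.toList hlen]
  simp only
  have h0 : 0 ≤ PySem.Int.mod (pvZ1A s.toList) 10 := PySem.Int.mod_nonneg _ (by norm_num)
  have h1 : PySem.Int.mod (pvZ1A s.toList) 10 < 10 := PySem.Int.mod_lt _ (by norm_num)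
  rw [← dv1_formula (pvZ1A s.toList)]
  exact loop_eq s.toList hlen 11 _ (by split_ifs <;> omega) (by split_ifs <;> omega)
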